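-- pv_equiv track=rewrite | github.com/bibekmaharjan77/DDP-Under-Predictions | run118.py | generate_type1_submeshes
-- ===== SOURCE A (Python) =====
-- import math
-- from collections import Counter, defaultdict
--
-- def generate_type1_submeshes(size):
--     levels = int(math.log2(size)) + 1
--     hierarchy = defaultdict(list)
--     for level in range(levels):
--         block_size = 2 ** level
--         for i in range(0, size, block_size):
--             for j in range(0, size, block_size):
--                 nodes = set((x, y) for x in range(i, min(i+block_size, size))
--                                      for y in range(j, min(j+block_size, size)))
--                 hierarchy[(level, 2)].append(nodes)
--     return hierarchy
-- ===== SOURCE B (Python) =====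
-- import math
-- from collections import defaultdict
--
-- def generate_type1_submeshes(size):
--     levels = size.bit_length()
--     hierarchy = defaultdict(list)
--     for level in range(levels):
--         bs = 1 << level
--         nb = (size + bs - 1) // bs
--         buckets = [set() for _ in range(nb * nb)]
--         for x in range(size):
--             for y in range(size):
--                 buckets[(x // bs) * nb + (y // bs)].add((x, y))
--         hierarchy[(level, 2)] = buckets
--     return hierarchy
-- ===== Notes on version B (the rewrite author's own statement) =====
-- stated objective: alternative
-- what changed: Per level, one flat pass over all (x,y) buckets each node into a preallocated nb*nb list of sets via index arithmetic (x//bs)*nb + y//bs, replacing the nested block-start loops that build one set comprehension per block; levels come from size.bit_length() instead of int(math.log2(size))+1.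
-- outside the precondition, e.g. on generate_type1_submeshes(0): A raises ValueError, B returns {}
import Mathlib
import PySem

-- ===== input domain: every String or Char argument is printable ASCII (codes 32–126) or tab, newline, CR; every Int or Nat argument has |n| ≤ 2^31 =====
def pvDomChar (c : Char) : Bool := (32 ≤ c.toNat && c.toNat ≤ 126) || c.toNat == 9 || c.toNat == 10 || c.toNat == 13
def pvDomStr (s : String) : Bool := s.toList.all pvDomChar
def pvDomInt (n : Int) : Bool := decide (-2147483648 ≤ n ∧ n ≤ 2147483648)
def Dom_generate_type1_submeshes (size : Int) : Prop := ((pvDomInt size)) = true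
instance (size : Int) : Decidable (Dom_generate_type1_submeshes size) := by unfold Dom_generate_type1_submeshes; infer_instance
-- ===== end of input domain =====

-- B replaces the per-level nested block-start loops (one set comprehension per block) by one flat pass
-- over the mesh that buckets every node into a preallocated nb*nb list of sets by index arithmetic.

-- ===== PORT A =====
def generate_type1_submeshes (size : Int) : List (Int × Int × List (List (Int × Int))) :=
  -- int(math.log2(size)) is ported as the floor logarithm Nat.log 2: math.log2 is correctly rounded,
  -- so int(math.log2(size)) = ⌊log2 size⌋ exactly for every 1 ≤ size ≤ 2^31 admitted by Dom.
  let levels : Int := (Nat.log 2 size.toNat : Int) + 1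
  (List.foldl (fun h level =>
      let block_size : Int := 2 ^ level.toNat   -- 2 ** level; level ≥ 0 on range(levels), so toNat is exact
      List.foldl (fun h i =>
          List.foldl (fun h j =>
              let nodes : List (Int × Int) :=
                PySem.Set.ofList ((PySem.List.pyRange i (min (i + block_size) size) 1).flatMap
                  (fun x => (PySem.List.pyRange j (min (j + block_size) size) 1).map (fun y => (x, y))))
              h.modify (level, (2:Int)) [] (fun l => l ++ [nodes]))   -- defaultdict: hierarchy[(level,2)].append(nodes)
            h (PySem.List.pyRange 0 size block_size))
        h (PySem.List.pyRange 0 size block_size))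
    (PySem.Dict.empty : PySem.Dict (Int × Int) (List (List (Int × Int)))) (PySem.List.pyRange 0 levels 1)).items.map (fun e => (e.1.1, e.1.2, e.2))

-- ===== PORT B =====
def generate_type1_submeshes_alt (size : Int) : List (Int × Int × List (List (Int × Int))) :=
  let levels : Int := (PySem.Int.bitLength size : Int)
  (List.foldl (fun h level =>
      let bs : Int := 1 <<< level.toNat       -- 1 << level; level ≥ 0 on range(levels), so toNat is exact
      let nb : Int := PySem.Int.floordiv (size + bs - 1) bs
      let buckets0 : List (List (Int × Int)) :=
        (PySem.List.pyRange 0 (nb * nb) 1).map (fun _ => PySem.Set.empty)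
      let buckets :=
        List.foldl (fun b x =>
            List.foldl (fun b y =>
                let k : Int := PySem.Int.floordiv x bs * nb + PySem.Int.floordiv y bs
                -- buckets[k].add((x, y)): k is provably in range for every mesh node, so pyGetD/pySetD are exact
                PySem.List.pySetD b k (PySem.Set.add (PySem.List.pyGetD b k []) (x, y)))
              b (PySem.List.pyRange 0 size 1))
          buckets0 (PySem.List.pyRange 0 size 1)
      h.insert (level, (2:Int)) buckets)
    (PySem.Dict.empty : PySem.Dict (Int × Int) (List (List (Int × Int)))) (PySem.List.pyRange 0 levels 1)).items.map (fun e => (e.1.1, e.1.2, e.2))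

-- ===== PRECONDITION & SPEC =====
-- Pre_ excludes exactly size ≤ 0, where the Python A raises ValueError (math.log2 domain error).
def Pre_generate_type1_submeshes (size : Int) : Prop := 1 ≤ size
instance (size : Int) : Decidable (Pre_generate_type1_submeshes size) := by unfold Pre_generate_type1_submeshes; infer_instance
def pvWitness_generate_type1_submeshes : Int := 4
def Spec_generate_type1_submeshes (size : Int) (out : List (Int × Int × List (List (Int × Int)))) : Prop := out = generate_type1_submeshes_alt size
instance (size : Int) (out : List (Int × Int × List (List (Int × Int)))) : Decidable (Spec_generate_type1_submeshes size out) := by unfold Spec_generate_type1_submeshes; infer_instance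

-- ===== CLAIM (what is proved, stated in full; the proofs are below) =====
def Claim_equal_generate_type1_submeshes : Prop := ∀ (size : Int), Dom_generate_type1_submeshes size → Pre_generate_type1_submeshes size → Spec_generate_type1_submeshes size (generate_type1_submeshes size)

-- ===== LEMMAS AND PROOFS =====

-- Shared abbreviations for the proofs (not used by the ports).
def pvBlock (s b i j : Int) : List (Int × Int) :=
  (PySem.List.pyRange i (min (i + b) s) 1).flatMap
    (fun x => (PySem.List.pyRange j (min (j + b) s) 1).map (fun y => (x, y)))
def pvLevelA (s b : Int) : List (List (Int × Int)) :=
  (PySem.List.pyRange 0 s b).flatMap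
    (fun i => (PySem.List.pyRange 0 s b).map (fun j => PySem.Set.ofList (pvBlock s b i j)))
def pvMesh (s : Int) : List (Int × Int) :=
  (PySem.List.pyRange 0 s 1).flatMap (fun x => (PySem.List.pyRange 0 s 1).map (fun y => (x, y)))
def pvIdx (b nb : Int) (p : Int × Int) : Int :=
  PySem.Int.floordiv p.1 b * nb + PySem.Int.floordiv p.2 b
def pvLevelB (s b : Int) : List (List (Int × Int)) :=
  let nb : Int := PySem.Int.floordiv (s + b - 1) b
  List.foldl (fun B p => PySem.List.pySetD B (pvIdx b nb p)
      (PySem.Set.add (PySem.List.pyGetD B (pvIdx b nb p) []) p))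
    ((PySem.List.pyRange 0 (nb * nb) 1).map (fun _ => PySem.Set.empty)) (pvMesh s)

def pvEntries (s lv : Int) : List ((Int × Int) × List (Int × Int)) :=
  (PySem.List.pyRange 0 s (2 ^ lv.toNat)).flatMap
    (fun i => (PySem.List.pyRange 0 s (2 ^ lv.toNat)).map
      (fun j => (((lv, (2:Int)) : Int × Int), PySem.Set.ofList (pvBlock s (2 ^ lv.toNat) i j))))


lemma pv_bitLength_eq (n : Int) (h : 1 ≤ n) :
    (PySem.Int.bitLength n : Int) = (Nat.log 2 n.toNat : Int) + 1 := by
  have hne : n ≠ 0 := by omega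
  have h1 := PySem.Int.lt_two_pow_bitLength n
  have h2 := PySem.Int.two_pow_bitLength_le n hne
  have habs : n.natAbs = n.toNat := by omega
  have hbl : 1 ≤ PySem.Int.bitLength n := by
    by_contra hc
    interval_cases hbl : PySem.Int.bitLength n
    · simp [hbl] at h1; omega
  have : Nat.log 2 n.toNat = PySem.Int.bitLength n - 1 := by
    apply Nat.log_eq_of_pow_le_of_lt_pow
    · rw [← habs]; exact h2
    · rw [← habs]; have : PySem.Int.bitLength n - 1 + 1 = PySem.Int.bitLength n := by omega
      rw [this]; exact h1
  rw [this]; push_cast [hbl]; omega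

lemma pv_range_mul (m n : Nat) (g : Nat → List (Int × Int)) :
    (List.range (m * n)).map g =
      (List.range m).flatMap (fun p => (List.range n).map (fun q => g (p * n + q))) := by
  induction m with
  | zero => simp
  | succ m ih =>
    rw [Nat.succ_mul, List.range_add, List.range_succ, List.map_append, ih]
    simp [List.map_map, Function.comp_def, Nat.add_comm]
lemma pv_flatMap_ite_nil (l : List Int) (c : Int → Prop) [DecidablePred c] (g : Int → List (Int × Int)) :
    (l.flatMap (fun a => if c a then g a else [])) =
      (l.filter (fun a => decide (c a))).flatMap g := by
  induction l with
  | nil => rfl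
  | cons a t ih =>
    by_cases h : c a <;> simp [List.filter_cons, h, ih]

lemma pv_bucketFold (idx : Int × Int → Int) :
    ∀ (items : List (Int × Int)) (B0 : List (List (Int × Int))),
      (∀ p ∈ items, 0 ≤ idx p ∧ idx p < (B0.length : Int)) →
      (List.foldl (fun B p => PySem.List.pySetD B (idx p)
          (PySem.Set.add (PySem.List.pyGetD B (idx p) []) p)) B0 items).length = B0.length ∧
      ∀ r : Nat, r < B0.length →
        (List.foldl (fun B p => PySem.List.pySetD B (idx p)
            (PySem.Set.add (PySem.List.pyGetD B (idx p) []) p)) B0 items).getD r [] =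
          List.foldl PySem.Set.add (B0.getD r []) (items.filter (fun p => idx p = (r : Int))) := by
  intro items
  induction items with
  | nil => intro B0 _; exact ⟨rfl, fun r _ => rfl⟩
  | cons p t ih =>
    intro B0 hb
    have hp := hb p (by simp)
    have hlt : (idx p).toNat < B0.length := by omega
    have hstep : (PySem.List.pySetD B0 (idx p)
        (PySem.Set.add (PySem.List.pyGetD B0 (idx p) []) p)) =
        B0.set (idx p).toNat (PySem.Set.add (B0.getD (idx p).toNat []) p) := by
      rw [PySem.List.pySetD_of_nonneg _ _ hp.1,
          PySem.List.pyGetD_eq_getElem _ _ hp.1 (by exact_mod_cast hp.2)]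
      rw [List.getD_eq_getElem _ _ hlt]
    have hb' : ∀ q ∈ t, 0 ≤ idx q ∧ idx q <
        ((B0.set (idx p).toNat (PySem.Set.add (B0.getD (idx p).toNat []) p)).length : Int) := by
      intro q hq; simpa using hb q (by simp [hq])
    obtain ⟨ihl, ihg⟩ := ih (B0.set (idx p).toNat (PySem.Set.add (B0.getD (idx p).toNat []) p)) hb'
    simp only [List.foldl_cons, hstep]
    constructor
    · simpa using ihl
    · intro r hr
      rw [ihg r (by simpa using hr)]
      by_cases hcase : idx p = (r : Int)
      · have : (idx p).toNat = r := by omega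
        simp [List.filter_cons, hcase, this, List.getD_eq_getElem _ _ hr,
          List.getD_eq_getElem _ _ (by simpa using hr), List.getElem_set_self,
          List.getD_eq_getElem _ _ hlt, List.getElem?_set, hr]
      · have hne : (idx p).toNat ≠ r := by omega
        simp [List.filter_cons, hcase, List.getD_eq_getElem _ _ hr,
          List.getD_eq_getElem _ _ (show r < (B0.set _ _).length by simpa using hr),
          List.getElem_set_ne hne, List.getElem?_set, hne]

lemma pv_filter_range (s b t : Int) (hb : 1 ≤ b) (ht0 : 0 ≤ t) (hts : t * b < s) :
    (PySem.List.pyRange 0 s 1).filter (fun v => decide (PySem.Int.floordiv v b = t)) =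
      PySem.List.pyRange (t * b) (min (t * b + b) s) 1 := by
  have hmin : min (t * b + b) s ≤ t * b + b := min_le_left _ _
  have h1 : (0:Int) ≤ t * b := mul_nonneg ht0 (by omega)
  rw [PySem.List.pyRange_one_append 0 (t * b) s h1 (by linarith),
      PySem.List.pyRange_one_append (t * b) (min (t * b + b) s) s (by omega) (min_le_right _ _),
      List.filter_append, List.filter_append]
  have c1 : (PySem.List.pyRange 0 (t * b) 1).filter (fun v => decide (PySem.Int.floordiv v b = t)) = [] := by
    apply List.filter_eq_nil_iff.mpr
    intro v hv
    rw [PySem.List.mem_pyRange_one] at hv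
    simp only [decide_eq_true_eq, PySem.Int.floordiv_eq_iff_of_pos (by omega : (0:Int) < b)]
    rintro ⟨hle, -⟩; linarith
  have c2 : (PySem.List.pyRange (t * b) (min (t * b + b) s) 1).filter
      (fun v => decide (PySem.Int.floordiv v b = t)) =
      PySem.List.pyRange (t * b) (min (t * b + b) s) 1 := by
    apply List.filter_eq_self.mpr
    intro v hv
    rw [PySem.List.mem_pyRange_one] at hv
    simp only [decide_eq_true_eq, PySem.Int.floordiv_eq_iff_of_pos (by omega : (0:Int) < b)]
    constructor
    · exact hv.1
    · have : (t + 1) * b = t * b + b := by ring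
      rw [this]; linarith [hv.2]
  have c3 : (PySem.List.pyRange (min (t * b + b) s) s 1).filter
      (fun v => decide (PySem.Int.floordiv v b = t)) = [] := by
    apply List.filter_eq_nil_iff.mpr
    intro v hv
    rw [PySem.List.mem_pyRange_one] at hv
    simp only [decide_eq_true_eq, PySem.Int.floordiv_eq_iff_of_pos (by omega : (0:Int) < b)]
    rintro ⟨-, hlt⟩
    have : (t + 1) * b = t * b + b := by ring
    rw [this] at hlt
    rcases le_or_gt (t * b + b) s with h | h
    · have := hv.1; rw [min_eq_left h] at this; linarith
    · have := hv.1; rw [min_eq_right (by linarith)] at this; linarith [hv.2]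
  rw [c1, c2, c3]; simp

lemma pv_filter_mesh (s b nb P Q : Int) (hs : 1 ≤ s) (hb : 1 ≤ b)
    (hnb : nb = (s - 1) / b + 1) (hP0 : 0 ≤ P) (hPlt : P < nb) (hQ0 : 0 ≤ Q) (hQlt : Q < nb) :
    (pvMesh s).filter (fun z => decide (pvIdx b nb z = P * nb + Q)) =
      pvBlock s b (P * b) (Q * b) := by
  have hb0 : (0:Int) < b := by omega
  have hnb0 : (0:Int) < nb := by omega
  have hdivlt : ∀ x : Int, 0 ≤ x → x < s → 0 ≤ x / b ∧ x / b < nb := by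
    intro x h0 h1
    refine ⟨Int.ediv_nonneg h0 (by omega), ?_⟩
    have := Int.ediv_le_ediv hb0 (show x ≤ s - 1 by omega)
    omega
  have hPb : P * b < s := by
    have : P ≤ (s - 1) / b := by omega
    have := (Int.le_ediv_iff_mul_le hb0).mp this
    omega
  have hQb : Q * b < s := by
    have : Q ≤ (s - 1) / b := by omega
    have := (Int.le_ediv_iff_mul_le hb0).mp this
    omega
  unfold pvMesh
  rw [List.filter_flatMap]
  have hstep1 : ∀ x ∈ PySem.List.pyRange 0 s 1,
      ((PySem.List.pyRange 0 s 1).map (fun y => (x, y))).filter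
          (fun z => decide (pvIdx b nb z = P * nb + Q)) =
        (if PySem.Int.floordiv x b = P then
          ((PySem.List.pyRange 0 s 1).filter (fun y => decide (PySem.Int.floordiv y b = Q))).map
            (fun y => (x, y)) else []) := by
    intro x hx
    rw [PySem.List.mem_pyRange_one] at hx
    rw [List.filter_map]
    have hcong : ∀ y ∈ PySem.List.pyRange 0 s 1,
        ((fun z => decide (pvIdx b nb z = P * nb + Q)) ∘ (fun y => (x, y))) y =
          (decide (PySem.Int.floordiv x b = P) && decide (PySem.Int.floordiv y b = Q)) := by
      intro y hy
      rw [PySem.List.mem_pyRange_one] at hy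
      simp only [Function.comp_apply, pvIdx, ← Bool.decide_and, decide_eq_decide]
      rw [PySem.Int.floordiv_eq_ediv_of_pos hb0, PySem.Int.floordiv_eq_ediv_of_pos hb0]
      have hu := hdivlt x hx.1 hx.2
      have hv := hdivlt y hy.1 hy.2
      constructor
      · intro hcond
        have huP : x / b = P := by
          have h1 : (y / b + (x / b) * nb) / nb = x / b := by
            rw [Int.add_mul_ediv_right _ _ (by omega), Int.ediv_eq_zero_of_lt hv.1 hv.2]
            ring
          have h2 : (Q + P * nb) / nb = P := by
            rw [Int.add_mul_ediv_right _ _ (by omega), Int.ediv_eq_zero_of_lt hQ0 hQlt]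
            ring
          have : y / b + (x / b) * nb = Q + P * nb := by linarith
          rw [← h1, this, h2]
        refine ⟨huP, ?_⟩
        rw [huP] at hcond
        linarith
      · rintro ⟨h1, h2⟩; rw [h1, h2]
    rw [List.filter_congr hcong]
    by_cases hcase : PySem.Int.floordiv x b = P
    · simp [hcase]
    · simp [hcase]
  rw [List.flatMap_congr hstep1,
      pv_flatMap_ite_nil _ (fun x => PySem.Int.floordiv x b = P) _,
      pv_filter_range s b P hb hP0 hPb, pv_filter_range s b Q hb hQ0 hQb]
  rfl

lemma pv_level_eq (s b : Int) (hs : 1 ≤ s) (hb : 1 ≤ b) :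
    pvLevelA s b = pvLevelB s b := by
  have hb0 : (0:Int) < b := by omega
  set nb : Int := PySem.Int.floordiv (s + b - 1) b with hnbdef
  have hnb : nb = (s - 1) / b + 1 := by
    rw [hnbdef, PySem.Int.floordiv_eq_ediv_of_pos hb0,
        show s + b - 1 = (s - 1) + b * 1 by ring, Int.add_mul_ediv_left _ _ (by omega)]
  have hnb1 : (1:Int) ≤ nb := by
    have : (0:Int) ≤ (s - 1) / b := Int.ediv_nonneg (by omega) (by omega)
    omega
  have hdivlt : ∀ x : Int, 0 ≤ x → x < s → 0 ≤ x / b ∧ x / b < nb := by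
    intro x h0 h1
    refine ⟨Int.ediv_nonneg h0 (by omega), ?_⟩
    have := Int.ediv_le_ediv hb0 (show x ≤ s - 1 by omega)
    omega
  set nbN : Nat := nb.toNat with hnbNdef
  have hnbN : (nbN : Int) = nb := Int.toNat_of_nonneg (by omega)
  -- characterize the starts list
  have hstarts : PySem.List.pyRange 0 s b = (List.range nbN).map (fun p : Nat => (p : Int) * b) := by
    rw [PySem.List.pyRange_of_pos 0 s hb0]
    have heq : (s - 0 + b - 1) / b = nb := by
      rw [hnbdef, PySem.Int.floordiv_eq_ediv_of_pos hb0]; ring_nf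
    rw [if_pos (by omega : (0:Int) < s), heq]
    exact List.map_congr_left (fun k _ => by ring)
  -- the mesh index stays in range
  have hbound : ∀ p ∈ pvMesh s, 0 ≤ pvIdx b nb p ∧ pvIdx b nb p <
      (((PySem.List.pyRange 0 (nb * nb) 1).map
        (fun _ => (PySem.Set.empty : List (Int × Int)))).length : Int) := by
    intro p hp
    obtain ⟨x, hx, y, hy, rfl⟩ := by
      simpa [pvMesh, List.mem_flatMap, List.mem_map] using hp
    have hx' := hdivlt x hx.1 hx.2
    have hy' := hdivlt y hy.1 hy.2
    have hlen : (((PySem.List.pyRange 0 (nb * nb) 1).map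
        (fun _ => (PySem.Set.empty : List (Int × Int)))).length : Int) = nb * nb := by
      rw [List.length_map, PySem.List.length_pyRange_one]
      have : nb * nb - 0 = ((nbN * nbN : Nat) : Int) := by push_cast [hnbN]; ring
      rw [this, Int.toNat_natCast]; push_cast [hnbN]; ring
    rw [hlen]
    unfold pvIdx
    dsimp only
    rw [PySem.Int.floordiv_eq_ediv_of_pos hb0, PySem.Int.floordiv_eq_ediv_of_pos hb0]
    constructor
    · have : (0:Int) ≤ x / b * nb := mul_nonneg hx'.1 (by omega)
      omega
    · nlinarith [hx'.2, hy'.2, hx'.1, hy'.1]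
  set B0 : List (List (Int × Int)) := (PySem.List.pyRange 0 (nb * nb) 1).map (fun _ => PySem.Set.empty) with hB0def
  have hB0len : B0.length = nbN * nbN := by
    rw [hB0def, List.length_map, PySem.List.length_pyRange_one,
        show nb * nb - 0 = ((nbN * nbN : Nat) : Int) from by push_cast [hnbN]; ring,
        Int.toNat_natCast]
  obtain ⟨hfl, hfg⟩ := pv_bucketFold (pvIdx b nb) (pvMesh s) B0 hbound
  have hLB : pvLevelB s b = List.foldl (fun B p => PySem.List.pySetD B (pvIdx b nb p)
      (PySem.Set.add (PySem.List.pyGetD B (pvIdx b nb p) []) p)) B0 (pvMesh s) := by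
    rw [hB0def, hnbdef]
    rfl
  have hB : pvLevelB s b = (List.range (nbN * nbN)).map
      (fun r : Nat => PySem.Set.ofList ((pvMesh s).filter (fun p => decide (pvIdx b nb p = (r : Int))))) := by
    rw [hLB]
    apply List.ext_getElem
    · rw [hfl, hB0len, List.length_map, List.length_range]
    · intro i h1 h2
      have hiB : i < B0.length := by rw [hfl] at h1; exact h1
      have hgd := hfg i hiB
      rw [← List.getD_eq_getElem _ ([] : List (Int × Int)) h1, hgd]
      have hBi : B0.getD i ([] : List (Int × Int)) = [] := by
        rw [List.getD_eq_getElem _ _ hiB]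
        simp [hB0def, PySem.Set.empty]
      rw [hBi, ← PySem.Set.ofList_eq_foldl]
      rw [List.getElem_map, List.getElem_range]
  rw [hB, pv_range_mul nbN nbN]
  unfold pvLevelA
  rw [hstarts, List.flatMap_map]
  refine List.flatMap_congr ?_
  intro p hp
  rw [List.map_map]
  refine List.map_congr_left ?_
  intro q hq
  rw [List.mem_range] at hp hq
  have hP : ((p : Nat) : Int) < nb := by rw [← hnbN]; exact_mod_cast hp
  have hQ : ((q : Nat) : Int) < nb := by rw [← hnbN]; exact_mod_cast hq
  have hcast : ((p * nbN + q : Nat) : Int) = (p : Int) * nb + (q : Int) := by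
    push_cast [hnbN]; ring
  simp only [Function.comp_apply]
  rw [hcast, pv_filter_mesh s b nb (p : Int) (q : Int) hs hb hnb
      (by positivity) hP (by positivity) hQ]


lemma pv_update_replicate_mem {k : Int × Int} (m : Nat) (S : PySem.Set (Int × Int)) (hk : k ∈ S) :
    PySem.Set.update S (List.replicate m k) = S := by
  induction m with
  | zero => rfl
  | succ m ih => rw [List.replicate_succ, PySem.Set.update_cons, PySem.Set.add_of_mem hk, ih]

lemma pv_update_replicate {k : Int × Int} (n : Nat) (S : PySem.Set (Int × Int))
    (hn : 1 ≤ n) (hk : k ∉ S) :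
    PySem.Set.update S (List.replicate n k) = S ++ [k] := by
  obtain ⟨m, rfl⟩ : ∃ m, n = m + 1 := ⟨n - 1, by omega⟩
  rw [List.replicate_succ, PySem.Set.update_cons, PySem.Set.add_of_not_mem hk,
      pv_update_replicate_mem m _ (by simp)]

lemma pv_levelA_ne_nil (s b : Int) (hs : 1 ≤ s) (hb : 1 ≤ b) : pvLevelA s b ≠ [] := by
  have h0 : (0:Int) ∈ PySem.List.pyRange 0 s b := by
    rw [PySem.List.mem_pyRange_iff_of_pos (by omega)]
    exact ⟨le_refl _, by omega, ⟨0, by ring⟩⟩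
  unfold pvLevelA
  intro hnil
  rw [List.flatMap_eq_nil_iff] at hnil
  have := hnil _ h0
  rw [List.map_eq_nil_iff] at this
  rw [this] at h0
  simp at h0

lemma pv_stepA (s lv : Int) (hs : 1 ≤ s)
    (d : PySem.Dict (Int × Int) (List (List (Int × Int))))
    (hnd : d.keys.Nodup) (hfresh : ((lv, (2:Int)) : Int × Int) ∉ d.keys) :
    List.foldl (fun d p => d.modify p.1 [] (fun x => x ++ [p.2])) d (pvEntries s lv) =
      d.insert (lv, (2:Int)) (pvLevelA s (2 ^ lv.toNat)) := by
  have hcont : d.contains ((lv, (2:Int)) : Int × Int) = false := by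
    rw [← Bool.not_eq_true, PySem.Dict.contains_iff_mem_keys]; exact hfresh
  have hent : pvEntries s lv =
      (pvLevelA s (2 ^ lv.toNat)).map (fun v => (((lv, (2:Int)) : Int × Int), v)) := by
    unfold pvEntries pvLevelA
    rw [List.map_flatMap]
    simp [List.map_map, Function.comp_def]
  have hne : (pvLevelA s (2 ^ lv.toNat)).length ≥ 1 := by
    have := pv_levelA_ne_nil s (2 ^ lv.toNat) hs (one_le_pow₀ (by norm_num))
    cases h : pvLevelA s (2 ^ lv.toNat) with
    | nil => exact absurd h this
    | cons a t => simp
  have hkeys : (List.foldl (fun d p => d.modify p.1 [] (fun x => x ++ [p.2])) d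
      (pvEntries s lv)).keys = d.keys ++ [((lv, (2:Int)) : Int × Int)] := by
    rw [PySem.Dict.keys_foldl_modify_key (pvEntries s lv) Prod.fst []
      (fun _ p => fun cur => cur ++ [p.2]) d]
    rw [hent, List.map_map]
    have : (Prod.fst ∘ fun v : List (Int × Int) => (((lv, (2:Int)) : Int × Int), v)) =
        fun _ : List (Int × Int) => ((lv, (2:Int)) : Int × Int) := rfl
    rw [this, List.map_const']
    exact pv_update_replicate _ _ hne hfresh
  have hknd : (d.keys ++ [((lv, (2:Int)) : Int × Int)]).Nodup := by
    rw [List.nodup_append]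
    refine ⟨hnd, List.nodup_singleton _, ?_⟩
    intro x hx y hy
    rw [List.mem_singleton] at hy
    subst hy
    intro he
    exact hfresh (he ▸ hx)
  apply PySem.Dict.ext
  rw [PySem.Dict.items_insert_of_not_contains d _ hcont]
  rw [PySem.Dict.items_eq_map_keys _ (hkeys ▸ hknd) [], hkeys, List.map_append]
  rw [PySem.Dict.items_eq_map_keys d hnd []]
  congr 1
  · apply List.map_congr_left
    intro c hc
    congr 1
    rw [PySem.Dict.getD_foldl_modify_append]
    have : List.filter (fun p => p.1 == c) (pvEntries s lv) = [] := by
      rw [hent, List.filter_map]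
      have hfc : ((fun p : (Int × Int) × List (Int × Int) => p.1 == c) ∘
          (fun v : List (Int × Int) => (((lv, (2:Int)) : Int × Int), v))) = fun _ : List (Int × Int) => (((lv, (2:Int)) : Int × Int) == c) := rfl
      rw [hfc]
      have : (((lv, (2:Int)) : Int × Int) == c) = false := by
        simp only [beq_eq_false_iff_ne, ne_eq]
        intro h; rw [← h] at hc; exact hfresh hc
      rw [this]
      simp
    rw [this]
    simp
  · simp only [List.map_cons, List.map_nil]
    congr 2
    rw [PySem.Dict.getD_foldl_modify_append,
        PySem.Dict.getD_of_not_contains _ _ hcont, hent, List.filter_map]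
    have hfc : ((fun p : (Int × Int) × List (Int × Int) => p.1 == ((lv, (2:Int)) : Int × Int)) ∘
        (fun v : List (Int × Int) => (((lv, (2:Int)) : Int × Int), v))) = fun _ : List (Int × Int) => true := by
      funext v; simp
    rw [hfc, List.filter_true]
    simp

lemma pv_canonA_items (size : Int) (hs : 1 ≤ size) : ∀ m : Nat,
    (List.foldl (fun d (lv : Int) =>
        List.foldl (fun d p => d.modify p.1 [] (fun x => x ++ [p.2])) d (pvEntries size lv))
      (PySem.Dict.empty : PySem.Dict (Int × Int) (List (List (Int × Int))))
      (PySem.List.pyRange 0 (m : Int) 1)).items =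
    (List.range m).map (fun l : Nat =>
      ((((l : Int), (2:Int)) : Int × Int), pvLevelA size (2 ^ ((l : Int)).toNat))) := by
  intro m
  induction m with
  | zero => simp [PySem.List.pyRange_one_eq_nil, PySem.Dict.empty]
  | succ m ih =>
    have hsplit : PySem.List.pyRange 0 ((m + 1 : Nat) : Int) 1 =
        PySem.List.pyRange 0 (m : Int) 1 ++ [(m : Int)] := by
      rw [show ((m + 1 : Nat) : Int) = (m : Int) + 1 by push_cast; ring]
      exact PySem.List.pyRange_one_succ_right (by positivity)
    rw [hsplit, List.foldl_append, List.foldl_cons, List.foldl_nil]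
    have hkeys : (List.foldl (fun d (lv : Int) =>
        List.foldl (fun d p => d.modify p.1 [] (fun x => x ++ [p.2])) d (pvEntries size lv))
        (PySem.Dict.empty : PySem.Dict (Int × Int) (List (List (Int × Int))))
        (PySem.List.pyRange 0 (m : Int) 1)).keys =
        (List.range m).map (fun l : Nat => (((l : Int), (2:Int)) : Int × Int)) := by
      have keysdef : ∀ (d : PySem.Dict (Int × Int) (List (List (Int × Int)))),
          d.keys = d.items.map (fun p => p.1) := fun _ => rfl
      rw [keysdef, ih, List.map_map]
      rfl
    have hnd : (List.foldl (fun d (lv : Int) =>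
        List.foldl (fun d p => d.modify p.1 [] (fun x => x ++ [p.2])) d (pvEntries size lv))
        (PySem.Dict.empty : PySem.Dict (Int × Int) (List (List (Int × Int))))
        (PySem.List.pyRange 0 (m : Int) 1)).keys.Nodup := by
      rw [hkeys]
      refine List.nodup_range.map ?_
      intro a b hab
      simpa using hab
    have hfresh : (((m : Int), (2:Int)) : Int × Int) ∉ (List.foldl (fun d (lv : Int) =>
        List.foldl (fun d p => d.modify p.1 [] (fun x => x ++ [p.2])) d (pvEntries size lv))
        (PySem.Dict.empty : PySem.Dict (Int × Int) (List (List (Int × Int))))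
        (PySem.List.pyRange 0 (m : Int) 1)).keys := by
      rw [hkeys]
      intro hmem
      obtain ⟨l, hl, he⟩ := List.mem_map.mp hmem
      have : (l : Int) = (m : Int) := (Prod.mk.injEq _ _ _ _).mp he |>.1
      have : l = m := by exact_mod_cast this
      rw [List.mem_range] at hl
      omega
    rw [pv_stepA size (m : Int) hs _ hnd hfresh,
        PySem.Dict.items_insert_of_not_contains _ _
          (by rw [← Bool.not_eq_true, PySem.Dict.contains_iff_mem_keys]; exact hfresh),
        ih, List.range_succ, List.map_append]
    rfl

lemma pv_portA_items (size : Int) (hs : 1 ≤ size) :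
    generate_type1_submeshes size =
      (PySem.List.pyRange 0 ((Nat.log 2 size.toNat : Int) + 1) 1).map
        (fun l => ((l, (2:Int), pvLevelA size (2 ^ l.toNat)) : Int × Int × List (List (Int × Int)))) := by
  simp only [generate_type1_submeshes]
  have hbody : ∀ (h : PySem.Dict (Int × Int) (List (List (Int × Int)))),
      ∀ lv ∈ PySem.List.pyRange 0 ((Nat.log 2 size.toNat : Int) + 1) 1,
      (let block_size : Int := 2 ^ lv.toNat
       List.foldl (fun h i =>
          List.foldl (fun h j =>
              let nodes : List (Int × Int) :=
                PySem.Set.ofList ((PySem.List.pyRange i (min (i + block_size) size) 1).flatMap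
                  (fun x => (PySem.List.pyRange j (min (j + block_size) size) 1).map (fun y => (x, y))))
              h.modify (lv, (2:Int)) [] (fun l => l ++ [nodes]))
            h (PySem.List.pyRange 0 size block_size))
        h (PySem.List.pyRange 0 size block_size)) =
      List.foldl (fun d p => d.modify p.1 [] (fun x => x ++ [p.2])) h (pvEntries size lv) := by
    intro h lv _
    unfold pvEntries
    rw [List.foldl_flatMap]
    simp only [List.foldl_map, pvBlock]
  refine Eq.trans (congrArg
      (fun d : PySem.Dict (Int × Int) (List (List (Int × Int))) =>
        d.items.map (fun e => (e.1.1, e.1.2, e.2)))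
      (PySem.List.foldl_congr_mem _ _
        (fun (h : PySem.Dict (Int × Int) (List (List (Int × Int)))) (lv : Int) =>
          List.foldl (fun d p => d.modify p.1 [] (fun x => x ++ [p.2])) h (pvEntries size lv)) _
        hbody)) ?_
  have hL0 : (0:Int) ≤ (Nat.log 2 size.toNat : Int) + 1 := by positivity
  obtain ⟨m, hm⟩ : ∃ m : Nat, (Nat.log 2 size.toNat : Int) + 1 = (m : Int) :=
    ⟨((Nat.log 2 size.toNat : Int) + 1).toNat, (Int.toNat_of_nonneg hL0).symm⟩
  rw [hm, pv_canonA_items size hs m, PySem.List.pyRange_one 0 (m : Int)]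
  simp [List.map_map, Function.comp_def]

lemma pv_portB_items (size : Int) (hs : 1 ≤ size) :
    generate_type1_submeshes_alt size =
      (PySem.List.pyRange 0 ((PySem.Int.bitLength size : Int)) 1).map
        (fun l => ((l, (2:Int), pvLevelB size (2 ^ l.toNat)) : Int × Int × List (List (Int × Int)))) := by
  simp only [generate_type1_submeshes_alt]
  have hbody : ∀ (h : PySem.Dict (Int × Int) (List (List (Int × Int)))) (lv : Int),
      lv ∈ PySem.List.pyRange 0 ((PySem.Int.bitLength size : Int)) 1 →
      (let bs : Int := 1 <<< lv.toNat
       let nb : Int := PySem.Int.floordiv (size + bs - 1) bs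
       let buckets0 : List (List (Int × Int)) :=
         (PySem.List.pyRange 0 (nb * nb) 1).map (fun _ => PySem.Set.empty)
       let buckets :=
         List.foldl (fun b x =>
             List.foldl (fun b y =>
                 let k : Int := PySem.Int.floordiv x bs * nb + PySem.Int.floordiv y bs
                 PySem.List.pySetD b k (PySem.Set.add (PySem.List.pyGetD b k []) (x, y)))
               b (PySem.List.pyRange 0 size 1))
           buckets0 (PySem.List.pyRange 0 size 1)
       h.insert (lv, (2:Int)) buckets) =
      h.insert (lv, (2:Int)) (pvLevelB size (2 ^ lv.toNat)) := by
    intro h lv _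
    have hbs : ((1 <<< lv.toNat : Nat) : Int) = 2 ^ lv.toNat := by
      simp [Nat.shiftLeft_eq]
    simp only [hbs]
    congr 1
    unfold pvLevelB pvMesh
    rw [List.foldl_flatMap]
    simp only [List.foldl_map, pvIdx]
  refine Eq.trans (congrArg
      (fun d : PySem.Dict (Int × Int) (List (List (Int × Int))) =>
        d.items.map (fun e => (e.1.1, e.1.2, e.2)))
      (PySem.List.foldl_congr_mem _ _
        (fun (h : PySem.Dict (Int × Int) (List (List (Int × Int)))) (level : Int) =>
          h.insert (level, (2:Int)) (pvLevelB size (2 ^ level.toNat))) _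
        hbody)) ?_
  rw [PySem.Dict.items_foldl_insert_fresh _ (fun lv : Int => ((lv, (2:Int)) : Int × Int))
        (fun lv : Int => pvLevelB size (2 ^ lv.toNat)) _
        (fun a _ => PySem.Dict.contains_empty _)
        (by
          refine (PySem.List.nodup_pyRange_one _ _).map ?_
          intro a b hab
          simpa using hab)]
  simp [List.map_map, Function.comp_def, PySem.Dict.empty]

-- ===== VERDICT (by name: the statement is the Claim_ definition above) =====
theorem generate_type1_submeshes_spec : Claim_equal_generate_type1_submeshes := by
  intro size _ hpre
  unfold Spec_generate_type1_submeshes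
  rw [pv_portA_items size hpre, pv_portB_items size hpre, pv_bitLength_eq size hpre]
  exact List.map_congr_left (fun l hl => by
    have hb : (1:Int) ≤ 2 ^ l.toNat := one_le_pow₀ (by norm_num)
    simp [pv_level_eq size (2 ^ l.toNat) hpre hb])
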